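-- pv_equiv track=rewrite | github.com/Ikelene/discord-shapes-ai | shapesBot.py | strip_quoted_reply
-- ===== SOURCE A (Python) =====
-- from typing import Dict, Optional, List, Tuple, Set
--
-- def strip_quoted_reply(text: str) -> str:
--     lines = text.splitlines()
--     out: List[str] = []
--     for i, line in enumerate(lines):
--         s = line.strip()
--         if i == 0 and s.startswith("Sent from my "):
--             continue
--         if s.startswith("On ") and s.endswith("wrote:"):
--             break
--         if s.startswith("-----Original Message-----"):
--             break
--         if s.startswith(">"):
--             continue
--         if s.lower().startswith("from: ") and i > 0:
--             break
--         out.append(line)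
--     cleaned = "\n".join(out).strip()
--     if not cleaned:
--         for line in lines:
--             if not line.strip().startswith(">"):
--                 cleaned = line.strip()
--                 if cleaned:
--                     break
--     return cleaned
-- ===== SOURCE B (Python) =====
-- from typing import List
--
-- def strip_quoted_reply(text: str) -> str:
--     # Single backward pass (right-to-left): reset the body whenever a reply
--     # marker is seen (so only lines before the first marker survive), while
--     # simultaneously computing the empty-body fallback line.
--     lines = text.splitlines()
--     body: List[str] = []
--     fb = ""
--     for i in range(len(lines) - 1, -1, -1):
--         s = lines[i].strip()
--         if not s.startswith(">") and s:
--             fb = s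
--         if ((s.startswith("On ") and s.endswith("wrote:"))
--                 or s.startswith("-----Original Message-----")
--                 or (i > 0 and s.lower().startswith("from: "))):
--             body = []
--         elif not s.startswith(">") and not (i == 0 and s.startswith("Sent from my ")):
--             body = [lines[i]] + body
--     cleaned = "\n".join(body).strip()
--     return cleaned or fb
-- ===== Notes on version B (the rewrite author's own statement) =====
-- stated objective: alternative
-- what changed: Replaces A's forward scan with break/continue plus a separate fallback loop by a single backward (right-to-left) pass that resets the accumulated body whenever a reply marker is seen and computes the empty-body fallback line in the same pass.
import Mathlib
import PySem

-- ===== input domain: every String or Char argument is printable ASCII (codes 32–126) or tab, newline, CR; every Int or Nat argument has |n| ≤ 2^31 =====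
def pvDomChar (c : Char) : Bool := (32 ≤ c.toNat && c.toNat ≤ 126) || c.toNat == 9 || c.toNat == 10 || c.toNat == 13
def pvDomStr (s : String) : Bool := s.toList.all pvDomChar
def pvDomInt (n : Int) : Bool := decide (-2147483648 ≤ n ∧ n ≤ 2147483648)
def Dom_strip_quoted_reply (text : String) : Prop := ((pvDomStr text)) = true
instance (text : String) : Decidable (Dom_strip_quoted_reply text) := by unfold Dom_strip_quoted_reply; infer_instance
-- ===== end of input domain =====

-- B replaces A's forward scan with break/continue by one backward (right-to-left) pass that resets the body at each reply marker and computes the empty-body fallback in the same pass; alternative decomposition, same cost.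


-- ===== PORT A =====
-- A's for-loop over enumerated lines, with continue/break/append in A's branch order
def stripQuotedLoopA : Nat → List String → List String
  | _, [] => []
  | i, line :: rest =>
    let s := PySem.Str.strip line
    if i == 0 && PySem.Str.startswith s "Sent from my " then
      stripQuotedLoopA (i + 1) rest
    else if PySem.Str.startswith s "On " && PySem.Str.endswith s "wrote:" then
      []
    else if PySem.Str.startswith s "-----Original Message-----" then
      []
    else if PySem.Str.startswith s ">" then
      stripQuotedLoopA (i + 1) rest
    else if PySem.Str.startswith (PySem.Str.lower s) "from: " && decide (0 < i) then
      []
    else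
      line :: stripQuotedLoopA (i + 1) rest

-- A's fallback loop; it is only entered when `cleaned` is "", and every assignment to
-- `cleaned` that does not break assigns "", so returning "" when the loop falls through is exact
def stripQuotedFallbackA : List String → String
  | [] => ""
  | line :: rest =>
    if !PySem.Str.startswith (PySem.Str.strip line) ">" then
      if PySem.Str.strip line ≠ "" then PySem.Str.strip line
      else stripQuotedFallbackA rest
    else stripQuotedFallbackA rest

def strip_quoted_reply (text : String) : String :=
  let lines := PySem.Str.splitlines text
  let out := stripQuotedLoopA 0 lines
  let cleaned := PySem.Str.strip (PySem.Str.join "\n" out)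
  if cleaned = "" then stripQuotedFallbackA lines else cleaned

-- ===== PORT B =====
-- one backward step of Source B's descending loop: update fallback, then reset/extend the body
def stepB (p : Int × String) (st : List String × String) : List String × String :=
  let s := PySem.Str.strip p.2
  let fb := if !PySem.Str.startswith s ">" && s ≠ "" then s else st.2
  let body :=
    if (PySem.Str.startswith s "On " && PySem.Str.endswith s "wrote:")
        || PySem.Str.startswith s "-----Original Message-----"
        || (decide (0 < p.1) && PySem.Str.startswith (PySem.Str.lower s) "from: ") then
      []
    else if !PySem.Str.startswith s ">"
        && !(p.1 == 0 && PySem.Str.startswith s "Sent from my ") then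
      p.2 :: st.1
    else
      st.1
  (body, fb)

def strip_quoted_reply_alt (text : String) : String :=
  let lines := PySem.Str.splitlines text
  let st := (PySem.List.enumerate lines).foldr stepB ([], "")
  let cleaned := PySem.Str.strip (PySem.Str.join "\n" st.1)
  if cleaned = "" then st.2 else cleaned

-- ===== PRECONDITION & SPEC =====
def Spec_strip_quoted_reply (text : String) (out : String) : Prop := out = strip_quoted_reply_alt text
instance (text : String) (out : String) : Decidable (Spec_strip_quoted_reply text out) := by unfold Spec_strip_quoted_reply; infer_instance

-- ===== CLAIM (what is proved, stated in full; the proofs are below) =====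
def Claim_equal_strip_quoted_reply : Prop := ∀ (text : String), Dom_strip_quoted_reply text → Spec_strip_quoted_reply text (strip_quoted_reply text)

-- ===== LEMMAS AND PROOFS =====

-- index-free normal form of the body for lines at positive index
def brkPos (s : String) : Bool :=
  (PySem.Str.startswith s "On " && PySem.Str.endswith s "wrote:")
  || PySem.Str.startswith s "-----Original Message-----"
  || PySem.Str.startswith (PySem.Str.lower s) "from: "

def bodyR : List String → List String
  | [] => []
  | l :: ls =>
    if brkPos (PySem.Str.strip l) then []
    else if !PySem.Str.startswith (PySem.Str.strip l) ">" then l :: bodyR ls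
    else bodyR ls

-- a line starting with ">" cannot lower to one starting with "from: "
theorem gt_not_from (cs : List Char) (h : PySem.Chars.startswith cs ['>'] = true) :
    PySem.Chars.startswith (PySem.Chars.lower cs) ['f','r','o','m',':',' '] = false := by
  rw [PySem.Chars.startswith_iff] at h
  obtain ⟨t, ht⟩ := h
  have hs : cs = '>' :: t := ht.symm
  have hlc : PySem.Chars.lowerChar '>' = '>' := by decide
  rw [hs]
  simp [PySem.Chars.lower, hlc, PySem.Chars.startswith, List.isPrefixOf]

theorem sent_not_on (cs : List Char)
    (h : PySem.Chars.startswith cs ['S','e','n','t',' ','f','r','o','m',' ','m','y',' '] = true) :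
    PySem.Chars.startswith cs ['O','n',' '] = false := by
  rw [PySem.Chars.startswith_iff] at h
  obtain ⟨t, ht⟩ := h
  have hs : cs = 'S' :: (['e','n','t',' ','f','r','o','m',' ','m','y',' '] ++ t) := by
    rw [← ht]; rfl
  rw [hs]
  simp [PySem.Chars.startswith, List.isPrefixOf]

theorem sent_not_orig (cs : List Char)
    (h : PySem.Chars.startswith cs ['S','e','n','t',' ','f','r','o','m',' ','m','y',' '] = true) :
    PySem.Chars.startswith cs
      ['-','-','-','-','-','O','r','i','g','i','n','a','l',' ','M','e','s','s','a','g','e','-','-','-','-','-'] = false := by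
  rw [PySem.Chars.startswith_iff] at h
  obtain ⟨t, ht⟩ := h
  have hs : cs = 'S' :: (['e','n','t',' ','f','r','o','m',' ','m','y',' '] ++ t) := by
    rw [← ht]; rfl
  rw [hs]
  simp [PySem.Chars.startswith, List.isPrefixOf]

-- A's loop at positive index is the index-free normal form
theorem loopA_pos (ls : List String) : ∀ i : Nat, 0 < i → stripQuotedLoopA i ls = bodyR ls := by
  induction ls with
  | nil => intro i _; simp [stripQuotedLoopA, bodyR]
  | cons l ls ih =>
    intro i hi
    have h0 : (i == 0) = false := by simp; omega
    have ih' := ih (i + 1) (by omega)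
    by_cases hOn : (PySem.Chars.startswith (PySem.Chars.strip l.toList) ['O','n',' '] = true
        ∧ PySem.Chars.endswith (PySem.Chars.strip l.toList) ['w','r','o','t','e',':'] = true)
    · simp [stripQuotedLoopA, bodyR, brkPos, h0, hOn]
    · by_cases hOr : PySem.Chars.startswith (PySem.Chars.strip l.toList)
          ['-','-','-','-','-','O','r','i','g','i','n','a','l',' ','M','e','s','s','a','g','e','-','-','-','-','-'] = true
      · simp [stripQuotedLoopA, bodyR, brkPos, h0, hOn, hOr]
      · by_cases hGt : PySem.Chars.startswith (PySem.Chars.strip l.toList) ['>'] = true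
        · have hFr := gt_not_from (PySem.Chars.strip l.toList) hGt
          simp [stripQuotedLoopA, bodyR, brkPos, h0, hOn, hOr, hGt, hFr, ih']
        · by_cases hFr : PySem.Chars.startswith (PySem.Chars.lower (PySem.Chars.strip l.toList))
              ['f','r','o','m',':',' '] = true
          · simp [stripQuotedLoopA, bodyR, brkPos, h0, hOn, hOr, hGt, hFr]
            omega
          · simp [stripQuotedLoopA, bodyR, brkPos, h0, hOn, hOr, hGt, hFr, ih']

-- B's backward fold at positive start index yields the index-free body and A's fallback value
theorem foldrB_pos (ls : List String) : ∀ j : Int, 1 ≤ j →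
    (PySem.List.enumerate ls j).foldr stepB ([], "") = (bodyR ls, stripQuotedFallbackA ls) := by
  induction ls with
  | nil => intro j _; simp [PySem.List.enumerate_nil, bodyR, stripQuotedFallbackA]
  | cons l ls ih =>
    intro j hj
    have hj0 : (j == 0) = false := by simp; omega
    have hjp : decide (0 < j) = true := by simp; omega
    have ih' := ih (j + 1) (by omega)
    rw [PySem.List.enumerate_cons, List.foldr_cons, ih']
    simp only [stepB, bodyR, stripQuotedFallbackA, brkPos, hj0, hjp, Prod.mk.injEq]
    refine ⟨by simp, ?_⟩
    by_cases hGt : PySem.Str.startswith (PySem.Str.strip l) ">" = true <;>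
      by_cases hE : PySem.Str.strip l = "" <;> simp_all

-- the fallback component of one step at index 0 is A's fallback on the whole list
theorem step0_eq (l : String) (ls : List String) :
    stepB (0, l) (bodyR ls, stripQuotedFallbackA ls)
      = (stripQuotedLoopA 0 (l :: ls), stripQuotedFallbackA (l :: ls)) := by
  have hfb : stripQuotedFallbackA (l :: ls)
      = (if PySem.Chars.startswith (PySem.Chars.strip l.toList) ['>'] = false ∧ ¬PySem.Str.strip l = ""
          then PySem.Str.strip l else stripQuotedFallbackA ls) := by
    by_cases hGt : PySem.Str.startswith (PySem.Str.strip l) ">" = true <;>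
      by_cases hE : PySem.Str.strip l = "" <;> simp_all [stripQuotedFallbackA]
  have hA1 : stripQuotedLoopA 1 ls = bodyR ls := loopA_pos ls 1 (by omega)
  by_cases hSent : PySem.Chars.startswith (PySem.Chars.strip l.toList)
      ['S','e','n','t',' ','f','r','o','m',' ','m','y',' '] = true
  · have hOn := sent_not_on _ hSent
    have hOr := sent_not_orig _ hSent
    simp [stepB, stripQuotedLoopA, hSent, hOn, hOr, hA1, ← hfb]
  · by_cases hOn : (PySem.Chars.startswith (PySem.Chars.strip l.toList) ['O','n',' '] = true
        ∧ PySem.Chars.endswith (PySem.Chars.strip l.toList) ['w','r','o','t','e',':'] = true)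
    · simp [stepB, stripQuotedLoopA, hSent, hOn, ← hfb]
    · by_cases hOr : PySem.Chars.startswith (PySem.Chars.strip l.toList)
          ['-','-','-','-','-','O','r','i','g','i','n','a','l',' ','M','e','s','s','a','g','e','-','-','-','-','-'] = true
      · simp [stepB, stripQuotedLoopA, hSent, hOn, hOr, ← hfb]
      · by_cases hGt : PySem.Chars.startswith (PySem.Chars.strip l.toList) ['>'] = true
        · simp [stepB, stripQuotedLoopA, hSent, hOn, hOr, hGt, hA1, hfb]
        · simp [stepB, stripQuotedLoopA, hSent, hOn, hOr, hGt, hA1, hfb]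

-- B's whole fold equals A's loop paired with A's fallback
theorem fold_eq (ls : List String) :
    (PySem.List.enumerate ls).foldr stepB ([], "")
      = (stripQuotedLoopA 0 ls, stripQuotedFallbackA ls) := by
  cases ls with
  | nil => simp [PySem.List.enumerate_nil, stripQuotedLoopA, stripQuotedFallbackA]
  | cons l ls =>
    rw [PySem.List.enumerate_cons, List.foldr_cons, zero_add, foldrB_pos ls 1 (by omega)]
    exact step0_eq l ls

-- ===== VERDICT (by name: the statement is the Claim_ definition above) =====
theorem strip_quoted_reply_spec : Claim_equal_strip_quoted_reply := by
  intro text _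
  show strip_quoted_reply text = strip_quoted_reply_alt text
  simp only [strip_quoted_reply, strip_quoted_reply_alt, fold_eq]
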